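-- pv_equiv track=rewrite | github.com/eliottcassidy2000/math | 04-computation/disjointness_analysis.py | pair_overlap_distribution
-- ===== SOURCE A (Python) =====
-- def pair_overlap_distribution(cycles):
--     """Distribution of |C_i intersect C_j| over all pairs."""
--     n = len(cycles)
--     overlap_dist = {}
--     for i in range(n):
--         for j in range(i+1, n):
--             ov = len(cycles[i][0] & cycles[j][0])
--             overlap_dist[ov] = overlap_dist.get(ov, 0) + 1
--     return overlap_dist
-- ===== SOURCE B (Python) =====
-- def pair_overlap_distribution(cycles):
--     """Distribution of |C_i intersect C_j| over all pairs, via an inverted index."""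
--     n = len(cycles)
--     if n < 2:
--         return {}
--     # inverted index: element -> increasing list of cycle indices whose first set contains it
--     index = {}
--     for i, c in enumerate(cycles):
--         for x in c[0]:
--             index.setdefault(x, []).append(i)
--     # overlap size for every co-occurring pair (i, j) with i < j
--     pairc = {}
--     for lst in index.values():
--         rest = lst
--         while rest:
--             ia = rest[0]
--             rest = rest[1:]
--             for ib in rest:
--                 key = (ia, ib)
--                 pairc[key] = pairc.get(key, 0) + 1
--     dist = {}
--     for i in range(n):
--         for j in range(i + 1, n):
--             ov = pairc.get((i, j), 0)
--             dist[ov] = dist.get(ov, 0) + 1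
--     return dist
-- ===== Notes on version B (the rewrite author's own statement) =====
-- stated objective: faster
-- what changed: Instead of intersecting every pair of sets (O(n^2 * s) set work), B builds an inverted index element -> incidence list, accumulates overlap counts only for co-occurring pairs, and then reads each pair's overlap with an O(1) dictionary lookup.
import Mathlib
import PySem

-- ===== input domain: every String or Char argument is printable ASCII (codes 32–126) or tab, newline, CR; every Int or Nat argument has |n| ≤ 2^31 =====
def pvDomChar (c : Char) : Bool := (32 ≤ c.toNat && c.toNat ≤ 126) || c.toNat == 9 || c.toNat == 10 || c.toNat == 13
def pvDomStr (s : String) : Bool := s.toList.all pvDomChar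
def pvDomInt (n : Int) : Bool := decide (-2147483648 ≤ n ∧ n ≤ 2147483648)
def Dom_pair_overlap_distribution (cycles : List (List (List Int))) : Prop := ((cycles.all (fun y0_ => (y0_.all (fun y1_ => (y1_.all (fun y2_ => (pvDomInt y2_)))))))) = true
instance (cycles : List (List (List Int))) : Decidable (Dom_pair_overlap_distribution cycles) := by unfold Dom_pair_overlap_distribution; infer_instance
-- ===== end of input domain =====

-- B replaces the all-pairs set intersections with an inverted index (element → incidence
-- list) plus a per-co-occurring-pair overlap counter; equality of the returned dicts
-- (as insertion-ordered association lists) is proved for every input where both Pythons return.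
-- Each inner List Int represents a Python set (its distinct elements); PySem.Set.ofList
-- is the interpretation of such a list as a PySem.Set.

-- ===== PORT A =====
-- 'ov = len(cycles[i][0] & cycles[j][0])'; 'overlap_dist[ov] = overlap_dist.get(ov, 0) + 1'
def pair_overlap_distribution (cycles : List (List (List Int))) : List (Int × Int) :=
  let n : Int := cycles.length
  let overlap_dist : PySem.Dict Int Int := PySem.Dict.empty
  ((PySem.List.pyRange 0 n).foldl (fun d i =>
    (PySem.List.pyRange (i + 1) n).foldl (fun d j =>
      let ov : Int := PySem.Set.len (PySem.Set.inter
        (PySem.Set.ofList (PySem.List.pyGetD (PySem.List.pyGetD cycles i []) 0 []))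
        (PySem.List.pyGetD (PySem.List.pyGetD cycles j []) 0 []))
      d.insert ov (d.getD ov 0 + 1)) d) overlap_dist).items

-- ===== PORT B =====
-- 'for i, c in enumerate(cycles): for x in c[0]: index.setdefault(x, []).append(i)'
-- (setdefault+append = d[x] becomes d.get(x, []) ++ [i], i.e. Dict.modify)
def povB_index (cycles : List (List (List Int))) : PySem.Dict Int (List Int) :=
  (PySem.List.enumerate cycles 0).foldl (fun d q =>
    (PySem.Set.ofList (PySem.List.pyGetD q.2 0 [])).foldl
      (fun d x => d.modify x [] (fun l => l ++ [q.1])) d)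
    PySem.Dict.empty

-- the 'while rest:' loop over one incidence list
def povB_pairLoop (d : PySem.Dict (Int × Int) Int) : List Int → PySem.Dict (Int × Int) Int
  | [] => d
  | ia :: rest =>
      povB_pairLoop (rest.foldl (fun d ib => d.insert (ia, ib) (d.getD (ia, ib) 0 + 1)) d) rest

-- 'for lst in index.values(): …'
def povB_pairc (idx : PySem.Dict Int (List Int)) : PySem.Dict (Int × Int) Int :=
  idx.values.foldl povB_pairLoop PySem.Dict.empty

def pair_overlap_distribution_alt (cycles : List (List (List Int))) : List (Int × Int) :=
  let n : Int := cycles.length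
  if n < 2 then [] else
  let pairc : PySem.Dict (Int × Int) Int := povB_pairc (povB_index cycles)
  ((PySem.List.pyRange 0 n).foldl (fun d i =>
    (PySem.List.pyRange (i + 1) n).foldl (fun d j =>
      let ov : Int := pairc.getD (i, j) 0
      d.insert ov (d.getD ov 0 + 1)) d) PySem.Dict.empty).items

-- ===== PRECONDITION & SPEC =====
-- With two or more cycles both Pythons index every 'cycle[0]', so both raise IndexError
-- when some cycle is an empty tuple; Pre_ excludes exactly those (raising) inputs and
-- admits everything else, in particular all inputs with fewer than two cycles.
def Pre_pair_overlap_distribution (cycles : List (List (List Int))) : Prop :=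
  cycles.length ≤ 1 ∨ ∀ c ∈ cycles, c ≠ []

instance (cycles : List (List (List Int))) : Decidable (Pre_pair_overlap_distribution cycles) := by
  unfold Pre_pair_overlap_distribution; infer_instance

def pvWitness_pair_overlap_distribution : List (List (List Int)) :=
  [[[1, 2], [5]], [[2, 3]], [[4]]]

def Spec_pair_overlap_distribution (cycles : List (List (List Int))) (out : List (Int × Int)) : Prop :=
  out = pair_overlap_distribution_alt cycles

instance (cycles : List (List (List Int))) (out : List (Int × Int)) : Decidable (Spec_pair_overlap_distribution cycles out) := by
  unfold Spec_pair_overlap_distribution; infer_instance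

-- ===== CLAIM (what is proved, stated in full; the proofs are below) =====
def Claim_equal_pair_overlap_distribution : Prop :=
  ∀ (cycles : List (List (List Int))), Dom_pair_overlap_distribution cycles →
    Pre_pair_overlap_distribution cycles →
    Spec_pair_overlap_distribution cycles (pair_overlap_distribution cycles)

-- ===== LEMMAS AND PROOFS =====

-- index built from cycles = index built from the list of first components
def povB_indexF (fs : List (List Int)) : PySem.Dict Int (List Int) :=
  (PySem.List.enumerate fs 0).foldl (fun d q =>
    (PySem.Set.ofList q.2).foldl (fun d x => d.modify x [] (fun l => l ++ [q.1])) d)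
    PySem.Dict.empty

def povB_firsts (cycles : List (List (List Int))) : List (List Int) :=
  cycles.map (fun c => PySem.List.pyGetD c 0 [])

theorem enumerate_map {α β : Type} (f : α → β) (l : List α) (s : Int) :
    PySem.List.enumerate (l.map f) s = (PySem.List.enumerate l s).map (fun q => (q.1, f q.2)) := by
  induction l generalizing s with
  | nil => simp [PySem.List.enumerate_nil]
  | cons x r ih => simp [PySem.List.enumerate_cons, ih]

theorem index_eq_indexF (cycles : List (List (List Int))) :
    povB_index cycles = povB_indexF (povB_firsts cycles) := by
  unfold povB_index povB_indexF povB_firsts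
  rw [enumerate_map, List.foldl_map]

-- the ordered pairs a while-loop pass over one incidence list generates
def pairsOf : List Int → List (Int × Int)
  | [] => []
  | x :: r => r.map (fun y => (x, y)) ++ pairsOf r

-- the flat (element, cycle-index) stream behind the inverted index
def elemIdx (fs : List (List Int)) : List (Int × Int) :=
  (PySem.List.enumerate fs 0).flatMap (fun q => (PySem.Set.ofList q.2).map (fun x => (x, q.1)))

theorem pairLoop_eq (lst : List Int) (d : PySem.Dict (Int × Int) Int) :
    povB_pairLoop d lst =
      (pairsOf lst).foldl (fun d k => d.insert k (d.getD k 0 + 1)) d := by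
  induction lst generalizing d with
  | nil => rfl
  | cons x r ih =>
      simp only [povB_pairLoop, pairsOf, List.foldl_append, List.foldl_map, ih]

theorem pairc_getD (idx : PySem.Dict Int (List Int)) (k : Int × Int) :
    (povB_pairc idx).getD k 0 = ((idx.values.flatMap pairsOf).count k : Int) := by
  unfold povB_pairc
  rw [PySem.List.foldl_congr_mem _ _
      (fun d lst => (pairsOf lst).foldl (fun d k => d.insert k (d.getD k 0 + 1)) d) _
      (fun acc x _ => pairLoop_eq x acc)]
  rw [← List.foldl_flatMap, PySem.Dict.getD_foldl_insert_add_one, PySem.Dict.getD_empty]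
  ring

theorem index_eq_flat (fs : List (List Int)) :
    povB_indexF fs =
      (elemIdx fs).foldl (fun d p => d.modify p.1 [] (fun l => l ++ [p.2])) PySem.Dict.empty := by
  unfold povB_indexF elemIdx
  rw [List.foldl_flatMap]
  exact PySem.List.foldl_congr_mem _ _ _ _ (fun acc q _ => by rw [List.foldl_map])

theorem index_getD (fs : List (List Int)) (e : Int) :
    (povB_indexF fs).getD e [] = ((elemIdx fs).filter (fun p => p.1 == e)).map (fun p => p.2) := by
  rw [index_eq_flat, PySem.Dict.getD_foldl_modify_append, PySem.Dict.getD_empty]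
  simp

theorem index_keys (fs : List (List Int)) :
    (povB_indexF fs).keys = PySem.Set.ofList ((elemIdx fs).map (fun p => p.1)) := by
  rw [index_eq_flat,
    PySem.Dict.keys_foldl_modify_key (elemIdx fs) (fun p : Int × Int => p.1) []
      (fun (_ : PySem.Dict Int (List Int)) (p : Int × Int) (l : List Int) => l ++ [p.2]),
    PySem.Dict.keys_empty, PySem.Set.update_nil_left]

theorem index_nodup (fs : List (List Int)) : (povB_indexF fs).keys.Nodup := by
  rw [index_eq_flat]
  exact PySem.Dict.nodup_keys_foldl_modify_key (elemIdx fs) (fun p : Int × Int => p.1) []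
    (fun (_ : PySem.Dict Int (List Int)) (p : Int × Int) (l : List Int) => l ++ [p.2]) _
    (by rw [PySem.Dict.keys_empty]; exact List.nodup_nil)

theorem mem_elemIdx (fs : List (List Int)) (e i : Int) :
    (e, i) ∈ elemIdx fs ↔ ∃ (k : Nat) (h : k < fs.length), i = (k : Int) ∧ e ∈ fs[k] := by
  unfold elemIdx
  simp only [List.mem_flatMap, List.mem_map, PySem.List.mem_enumerate_iff]
  constructor
  · rintro ⟨q, ⟨k, hk, rfl⟩, x, hx, hxe⟩
    have he : x = e := congrArg Prod.fst hxe
    have hi : (0 : Int) + (k : Int) = i := congrArg Prod.snd hxe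
    refine ⟨k, hk, by omega, ?_⟩
    rw [← he]
    exact (PySem.Set.mem_ofList _ _).mp hx
  · rintro ⟨k, hk, rfl, he⟩
    exact ⟨((0 : Int) + k, fs[k]), ⟨k, hk, rfl⟩, e,
      (PySem.Set.mem_ofList _ _).mpr he, by simp⟩

theorem mem_inc (fs : List (List Int)) (e i : Int) :
    i ∈ ((elemIdx fs).filter (fun p => p.1 == e)).map (fun p => p.2) ↔ (e, i) ∈ elemIdx fs := by
  simp only [List.mem_map, List.mem_filter]
  constructor
  · rintro ⟨p, ⟨hp, hpe⟩, rfl⟩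
    have : p.1 = e := by simpa using hpe
    rwa [show (e, p.2) = p from by rw [← this]]
  · intro h
    exact ⟨(e, i), ⟨h, by simp⟩, rfl⟩

theorem elemIdx_pairwise (fs : List (List Int)) :
    (elemIdx fs).Pairwise (fun p q => p.1 = q.1 → p.2 < q.2) := by
  unfold elemIdx
  rw [List.pairwise_flatMap]
  constructor
  · intro q _
    rw [List.pairwise_map]
    exact (PySem.Set.nodup_ofList q.2).imp (fun {a b} hab => by simp [hab])
  · refine (PySem.List.pairwise_lt_enumerate fs 0).imp ?_
    intro a b hab x hx y hy _
    obtain ⟨xa, _, rfl⟩ := List.mem_map.mp hx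
    obtain ⟨yb, _, rfl⟩ := List.mem_map.mp hy
    exact hab

theorem inc_pairwise (fs : List (List Int)) (e : Int) :
    (((elemIdx fs).filter (fun p => p.1 == e)).map (fun p => p.2)).Pairwise (· < ·) := by
  rw [List.pairwise_map]
  have h1 : ((elemIdx fs).filter (fun p => p.1 == e)).Pairwise (fun p q => p.1 = q.1 → p.2 < q.2) :=
    (elemIdx_pairwise fs).filter _
  refine h1.imp_of_mem ?_
  intro a b ha hb hab
  have h2 : a.1 = e := by simpa using (List.mem_filter.mp ha).2
  have h3 : b.1 = e := by simpa using (List.mem_filter.mp hb).2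
  exact hab (h2.trans h3.symm)

theorem count_map_pair (r : List Int) (x i j : Int) :
    (r.map (fun y => (x, y))).count (i, j) = if x = i then r.count j else 0 := by
  by_cases h : x = i
  · subst h
    rw [if_pos rfl]
    simp only [List.count, List.countP_map, Function.comp_def]
    congr 1
    funext y
    simp [Prod.ext_iff]
  · simp only [if_neg h]
    rw [List.count_eq_zero]
    simp [h]

theorem pairsOf_count (lst : List Int) (h : lst.Pairwise (· < ·)) (i j : Int) (hij : i < j) :
    (pairsOf lst).count (i, j) = if i ∈ lst ∧ j ∈ lst then 1 else 0 := by
  induction lst with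
  | nil => simp [pairsOf]
  | cons x r ih =>
      rcases List.pairwise_cons.mp h with ⟨hx, hr⟩
      have hrnd : r.Nodup := hr.imp (fun {a b} hab => ne_of_lt hab)
      have hxr : x ∉ r := fun hm => lt_irrefl x (hx x hm)
      rw [pairsOf, List.count_append, count_map_pair, ih hr]
      by_cases hxi : x = i
      · subst hxi
        have hjx : j ≠ x := ne_of_gt hij
        by_cases hjr : j ∈ r
        · rw [List.count_eq_one_of_mem hrnd hjr]
          simp [hxr, hjr, hjx]
        · rw [List.count_eq_zero.mpr hjr]
          simp [hxr, hjr, hjx]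
      · by_cases hjx : j = x
        · subst hjx
          have hinr : i ∉ r := fun hm => absurd (hx i hm) (by omega)
          have : ¬ i = j := by omega
          simp [hinr, hxr, hxi, this]
        · have hix : ¬ i = x := fun h' => hxi h'.symm
          simp [List.mem_cons, hxi, hix, hjx]

theorem nodup_length_eq (l1 l2 : List Int) (h1 : l1.Nodup) (h2 : l2.Nodup)
    (hm : ∀ x, x ∈ l1 ↔ x ∈ l2) : l1.length = l2.length :=
  ((List.perm_ext_iff_of_nodup h1 h2).mpr hm).length_eq

theorem pairc_eq_inter (fs : List (List Int)) (i j : Int)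
    (h0 : 0 ≤ i) (hij : i < j) (hj : j < (fs.length : Int)) :
    (povB_pairc (povB_indexF fs)).getD (i, j) 0 =
      PySem.Set.len (PySem.Set.inter
        (PySem.Set.ofList (PySem.List.pyGetD fs i []))
        (PySem.List.pyGetD fs j [])) := by
  have h0j : (0 : Int) ≤ j := by omega
  have hiN : i.toNat < fs.length := by omega
  have hjN : j.toNat < fs.length := by omega
  have hgi : PySem.List.pyGetD fs i [] = fs[i.toNat] :=
    PySem.List.pyGetD_eq_getElem fs [] h0 (by omega)
  have hgj : PySem.List.pyGetD fs j [] = fs[j.toNat] :=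
    PySem.List.pyGetD_eq_getElem fs [] h0j hj
  rw [pairc_getD, List.count_flatMap,
      PySem.Dict.values_eq_map_keys _ (index_nodup fs) [], List.map_map, hgi, hgj]
  have hpt : ∀ e : Int, ((List.count (i, j) ∘ pairsOf) ∘ fun k => (povB_indexF fs).getD k []) e
      = if e ∈ fs[i.toNat] ∧ e ∈ fs[j.toNat] then (1 : Nat) else 0 := by
    intro e
    simp only [Function.comp_apply]
    rw [index_getD, pairsOf_count _ (inc_pairwise fs e) i j hij]
    have hcond : ∀ (m : Int) (hm0 : 0 ≤ m) (hmN : m.toNat < fs.length),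
        m ∈ ((elemIdx fs).filter (fun p => p.1 == e)).map (fun p => p.2) ↔ e ∈ fs[m.toNat] := by
      intro m hm0 hmN
      rw [mem_inc, mem_elemIdx]
      constructor
      · rintro ⟨k, hk, hmk, he⟩
        have : k = m.toNat := by omega
        subst this; exact he
      · intro he; exact ⟨m.toNat, hmN, by omega, he⟩
    rw [if_congr (and_congr (hcond i h0 hiN) (hcond j h0j hjN)) rfl rfl]
  rw [List.map_congr_left (fun e _ => hpt e)]
  have hbool : (fun e : Int => if e ∈ fs[i.toNat] ∧ e ∈ fs[j.toNat] then (1 : Nat) else 0)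
      = fun e : Int => if (decide (e ∈ fs[i.toNat]) && decide (e ∈ fs[j.toNat])) then (1 : Nat) else 0 := by
    funext e
    by_cases h : e ∈ fs[i.toNat] ∧ e ∈ fs[j.toNat] <;> simp [h]
  rw [hbool, PySem.List.sum_map_ite_one_zero_nat, List.countP_eq_length_filter]
  simp only [PySem.Set.len, PySem.Set.inter]
  have hlen : ((povB_indexF fs).keys.filter
        (fun e => decide (e ∈ fs[i.toNat]) && decide (e ∈ fs[j.toNat]))).length
      = ((PySem.Set.ofList fs[i.toNat]).filter (fun x => PySem.Set.contains fs[j.toNat] x)).length := by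
    apply nodup_length_eq
    · exact (index_nodup fs).filter _
    · exact (PySem.Set.nodup_ofList _).filter _
    · intro x
      simp only [List.mem_filter, PySem.Set.mem_ofList, Bool.and_eq_true, decide_eq_true_eq,
        PySem.Set.contains_iff]
      constructor
      · rintro ⟨_, hxi, hxj⟩
        exact ⟨hxi, hxj⟩
      · rintro ⟨hxi, hxj⟩
        refine ⟨?_, hxi, hxj⟩
        rw [index_keys, PySem.Set.mem_ofList, List.mem_map]
        exact ⟨(x, i), (mem_elemIdx fs x i).mpr ⟨i.toNat, hiN, by omega, hxi⟩, rfl⟩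
  rw [hlen]

-- A produces the empty dict when there are fewer than two cycles
theorem portA_small (cycles : List (List (List Int))) (h : cycles.length ≤ 1) :
    pair_overlap_distribution cycles = [] := by
  match cycles, h with
  | [], _ => rfl
  | [c], _ =>
      simp [pair_overlap_distribution, PySem.List.pyRange_one, List.range_succ,
        PySem.Dict.items, PySem.Dict.empty]

-- ===== VERDICT (by name: the statement is the Claim_ definition above) =====
theorem pair_overlap_distribution_spec : Claim_equal_pair_overlap_distribution := by
  intro cycles _ _
  unfold Spec_pair_overlap_distribution
  by_cases hn : (cycles.length : Int) < 2
  · rw [portA_small cycles (by omega)]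
    unfold pair_overlap_distribution_alt
    simp [hn]
  · unfold pair_overlap_distribution pair_overlap_distribution_alt
    dsimp only
    rw [if_neg hn]
    congr 1
    apply PySem.List.foldl_congr_mem
    intro acc i hi
    apply PySem.List.foldl_congr_mem
    intro acc2 j hj
    obtain ⟨hi0, hin⟩ := PySem.List.mem_pyRange_one.mp hi
    obtain ⟨hj1, hjn⟩ := PySem.List.mem_pyRange_one.mp hj
    have hfs : ∀ k : Int, PySem.List.pyGetD (PySem.List.pyGetD cycles k []) 0 []
        = PySem.List.pyGetD (povB_firsts cycles) k [] := by
      intro k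
      unfold povB_firsts
      exact (PySem.List.pyGetD_map (fun c => PySem.List.pyGetD c 0 []) cycles k []).symm
    have hlen : ((povB_firsts cycles).length : Int) = (cycles.length : Int) := by
      unfold povB_firsts; rw [List.length_map]
    have hov := pairc_eq_inter (povB_firsts cycles) i j hi0 (by omega) (by omega)
    rw [index_eq_indexF, hfs i, hfs j, ← hov]
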